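-- pv_equiv track=rewrite | github.com/incidexau-source/Incidex | scripts/policy_landscape.py | determine_policy_status
-- ===== SOURCE A (Python) =====
-- from typing import Dict, List, Optional, Set
--
-- def map_bill_to_policy_area(bill: Dict) -> Optional[str]:
--     """Map a bill to a policy area based on keywords and title."""
--     title = bill.get('title', '').lower()
--     keywords = bill.get('keywords_matched', '').lower()
--     combined = f"{title} {keywords}"
--
--     # Marriage equality
--     if any(kw in combined for kw in ['marriage', 'same-sex marriage', 'marriage equality']):
--         return 'marriage_equality'
--
--     # Conversion therapy
--     if any(kw in combined for kw in ['conversion', 'conversion therapy', 'conversion practices']):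
--         return 'conversion_therapy_ban'
--
--     # Gender recognition
--     if any(kw in combined for kw in ['gender recognition', 'gender identity', 'birth certificate', 'gender marker']):
--         return 'gender_recognition'
--
--     # Discrimination protection
--     if any(kw in combined for kw in ['discrimination', 'anti-discrimination', 'equal opportunity']):
--         return 'discrimination_protection'
--
--     # Hate crime
--     if any(kw in combined for kw in ['hate crime', 'hate crime', 'incitement', 'vilification']):
--         if 'hate crime' in combined:
--             return 'hate_crime_law'
--         else:
--             return 'vilification_law'
--
--     # Religious exemptions
--     if any(kw in combined for kw in ['religious exemption', 'religious freedom', 'religious discrimination']):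
--         return 'religious_exemptions'
--
--     # School protections
--     if any(kw in combined for kw in ['school', 'education', 'student']):
--         return 'school_protections'
--
--     # Healthcare
--     if any(kw in combined for kw in ['health', 'healthcare', 'medical']):
--         return 'healthcare_access'
--
--     # Adoption
--     if 'adoption' in combined:
--         return 'adoption_rights'
--
--     # Surrogacy
--     if 'surrogacy' in combined:
--         return 'surrogacy_rights'
--
--     return None
--
-- def determine_policy_status(bills: List[Dict], jurisdiction: str, policy_area: str) -> str:
--     """Determine current policy status based on bills."""
--     relevant_bills = [
--         b for b in bills
--         if b.get('parliament') == jurisdiction and map_bill_to_policy_area(b) == policy_area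
--     ]
--
--     if not relevant_bills:
--         return 'unknown'
--
--     # Check bill statuses
--     statuses = [b.get('status', '').lower() for b in relevant_bills]
--
--     if any('passed' in s for s in statuses):
--         return 'legal'
--     elif any('rejected' in s or 'defeated' in s for s in statuses):
--         return 'illegal'
--     elif any('debate' in s or 'reading' in s or 'committee' in s for s in statuses):
--         return 'in_progress'
--     elif any('introduced' in s for s in statuses):
--         return 'proposed'
--     else:
--         return 'in_progress'
-- ===== SOURCE B (Python) =====
-- # Table-driven rewrite: keyword tables + first-match scan for the area, and a numeric
-- # priority rank per status with a running maximum instead of list-building + any() scans.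
--
-- POLICY_TABLE = [
--     (['marriage', 'same-sex marriage', 'marriage equality'], 'marriage_equality'),
--     (['conversion', 'conversion therapy', 'conversion practices'], 'conversion_therapy_ban'),
--     (['gender recognition', 'gender identity', 'birth certificate', 'gender marker'], 'gender_recognition'),
--     (['discrimination', 'anti-discrimination', 'equal opportunity'], 'discrimination_protection'),
--     (['hate crime'], 'hate_crime_law'),
--     (['incitement', 'vilification'], 'vilification_law'),
--     (['religious exemption', 'religious freedom', 'religious discrimination'], 'religious_exemptions'),
--     (['school', 'education', 'student'], 'school_protections'),
--     (['health', 'healthcare', 'medical'], 'healthcare_access'),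
--     (['adoption'], 'adoption_rights'),
--     (['surrogacy'], 'surrogacy_rights'),
-- ]
--
-- STATUS_RANKS = [
--     (['passed'], 4),
--     (['rejected', 'defeated'], 3),
--     (['debate', 'reading', 'committee'], 2),
--     (['introduced'], 1),
-- ]
--
-- RESULTS = {4: 'legal', 3: 'illegal', 2: 'in_progress', 1: 'proposed', 0: 'in_progress'}
--
--
-- def classify_area(bill):
--     combined = (bill.get('title', '') + ' ' + bill.get('keywords_matched', '')).lower()
--     for kws, area in POLICY_TABLE:
--         if any(kw in combined for kw in kws):
--             return area
--     return None
--
--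
-- def status_rank(status):
--     s = status.lower()
--     for kws, r in STATUS_RANKS:
--         if any(kw in s for kw in kws):
--             return r
--     return 0
--
--
-- def determine_policy_status(bills, jurisdiction, policy_area):
--     best = -1
--     for b in bills:
--         if b.get('parliament') == jurisdiction and classify_area(b) == policy_area:
--             r = status_rank(b.get('status', ''))
--             if r > best:
--                 best = r
--     return 'unknown' if best < 0 else RESULTS[best]
-- ===== Notes on version B (the rewrite author's own statement) =====
-- stated objective: alternative
-- what changed: Replaces A's if-cascade keyword classifier with a table of (keywords, area) rows scanned for the first match, and replaces A's relevant-bills list, statuses list and four any() scans with a per-status numeric priority rank whose maximum is taken in one pass and mapped to the result through a lookup table.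
import Mathlib
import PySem

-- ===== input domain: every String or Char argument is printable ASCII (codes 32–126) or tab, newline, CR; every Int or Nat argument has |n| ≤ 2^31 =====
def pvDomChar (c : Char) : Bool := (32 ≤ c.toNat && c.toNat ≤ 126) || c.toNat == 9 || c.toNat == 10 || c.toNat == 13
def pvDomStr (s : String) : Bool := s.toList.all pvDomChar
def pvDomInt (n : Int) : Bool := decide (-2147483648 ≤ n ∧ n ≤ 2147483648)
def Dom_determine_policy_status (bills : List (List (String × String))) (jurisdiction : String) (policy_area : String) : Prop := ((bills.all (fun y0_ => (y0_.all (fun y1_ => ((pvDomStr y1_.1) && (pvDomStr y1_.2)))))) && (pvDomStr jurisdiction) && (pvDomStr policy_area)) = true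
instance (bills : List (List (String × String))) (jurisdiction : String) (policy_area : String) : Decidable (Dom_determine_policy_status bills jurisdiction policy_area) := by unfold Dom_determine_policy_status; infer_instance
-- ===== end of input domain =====

-- B is a table-driven rewrite: keyword tables scanned for the first match instead of A's
-- if-cascades, and a numeric priority rank per status maximised in one pass instead of A's
-- intermediate lists and four any() scans (objective: alternative).

-- ===== PORT A =====
def map_bill_to_policy_area (bill : List (String × String)) : Option String :=
  let title := PySem.Str.lower ((PySem.Dict.mk bill).getD "title" "")
  let keywords := PySem.Str.lower ((PySem.Dict.mk bill).getD "keywords_matched" "")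
  let combined := title ++ " " ++ keywords
  if ["marriage", "same-sex marriage", "marriage equality"].any (fun kw => PySem.Str.isIn kw combined) then some "marriage_equality"
  else if ["conversion", "conversion therapy", "conversion practices"].any (fun kw => PySem.Str.isIn kw combined) then some "conversion_therapy_ban"
  else if ["gender recognition", "gender identity", "birth certificate", "gender marker"].any (fun kw => PySem.Str.isIn kw combined) then some "gender_recognition"
  else if ["discrimination", "anti-discrimination", "equal opportunity"].any (fun kw => PySem.Str.isIn kw combined) then some "discrimination_protection"
  else if ["hate crime", "hate crime", "incitement", "vilification"].any (fun kw => PySem.Str.isIn kw combined) then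
    (if PySem.Str.isIn "hate crime" combined then some "hate_crime_law" else some "vilification_law")
  else if ["religious exemption", "religious freedom", "religious discrimination"].any (fun kw => PySem.Str.isIn kw combined) then some "religious_exemptions"
  else if ["school", "education", "student"].any (fun kw => PySem.Str.isIn kw combined) then some "school_protections"
  else if ["health", "healthcare", "medical"].any (fun kw => PySem.Str.isIn kw combined) then some "healthcare_access"
  else if PySem.Str.isIn "adoption" combined then some "adoption_rights"
  else if PySem.Str.isIn "surrogacy" combined then some "surrogacy_rights"
  else none

def determine_policy_status (bills : List (List (String × String))) (jurisdiction : String) (policy_area : String) : String :=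
  let relevant_bills := bills.filter (fun b =>
    ((PySem.Dict.mk b).get? "parliament" == some jurisdiction) && (map_bill_to_policy_area b == some policy_area))
  if relevant_bills.isEmpty then "unknown"
  else
    let statuses := relevant_bills.map (fun b => PySem.Str.lower ((PySem.Dict.mk b).getD "status" ""))
    if statuses.any (fun s => PySem.Str.isIn "passed" s) then "legal"
    else if statuses.any (fun s => PySem.Str.isIn "rejected" s || PySem.Str.isIn "defeated" s) then "illegal"
    else if statuses.any (fun s => PySem.Str.isIn "debate" s || PySem.Str.isIn "reading" s || PySem.Str.isIn "committee" s) then "in_progress"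
    else if statuses.any (fun s => PySem.Str.isIn "introduced" s) then "proposed"
    else "in_progress"

-- ===== PORT B =====
def pvPolicyTable : List (List String × String) := [
  (["marriage", "same-sex marriage", "marriage equality"], "marriage_equality"),
  (["conversion", "conversion therapy", "conversion practices"], "conversion_therapy_ban"),
  (["gender recognition", "gender identity", "birth certificate", "gender marker"], "gender_recognition"),
  (["discrimination", "anti-discrimination", "equal opportunity"], "discrimination_protection"),
  (["hate crime"], "hate_crime_law"),
  (["incitement", "vilification"], "vilification_law"),
  (["religious exemption", "religious freedom", "religious discrimination"], "religious_exemptions"),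
  (["school", "education", "student"], "school_protections"),
  (["health", "healthcare", "medical"], "healthcare_access"),
  (["adoption"], "adoption_rights"),
  (["surrogacy"], "surrogacy_rights")]

def pvStatusRanks : List (List String × Int) := [
  (["passed"], 4),
  (["rejected", "defeated"], 3),
  (["debate", "reading", "committee"], 2),
  (["introduced"], 1)]

def pvResults : PySem.Dict Int String :=
  PySem.Dict.mk [(4, "legal"), (3, "illegal"), (2, "in_progress"), (1, "proposed"), (0, "in_progress")]

-- the first-match table loop of Source B = List.find?
def classify_area (bill : List (String × String)) : Option String :=
  let combined := PySem.Str.lower ((PySem.Dict.mk bill).getD "title" "" ++ " " ++ (PySem.Dict.mk bill).getD "keywords_matched" "")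
  (pvPolicyTable.find? (fun e => e.1.any (fun kw => PySem.Str.isIn kw combined))).map Prod.snd

def status_rank (status : String) : Int :=
  let s := PySem.Str.lower status
  match pvStatusRanks.find? (fun e => e.1.any (fun kw => PySem.Str.isIn kw s)) with
  | some e => e.2
  | none => 0

def determine_policy_status_alt (bills : List (List (String × String))) (jurisdiction : String) (policy_area : String) : String :=
  let best := bills.foldl (fun best b =>
    if ((PySem.Dict.mk b).get? "parliament" == some jurisdiction) && (classify_area b == some policy_area) then
      let r := status_rank ((PySem.Dict.mk b).getD "status" "")
      if r > best then r else best
    else best) (-1 : Int)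
  if best < 0 then "unknown"
  -- RESULTS[best]: best is always one of the dict's keys here, so the getD default is unreachable
  else ((pvResults.get? best).getD "unknown")

-- ===== PRECONDITION & SPEC =====
def Spec_determine_policy_status (bills : List (List (String × String))) (jurisdiction : String) (policy_area : String) (out : String) : Prop := out = determine_policy_status_alt bills jurisdiction policy_area
instance (bills : List (List (String × String))) (jurisdiction : String) (policy_area : String) (out : String) : Decidable (Spec_determine_policy_status bills jurisdiction policy_area out) := by unfold Spec_determine_policy_status; infer_instance

-- ===== CLAIM =====
def Claim_equal_determine_policy_status : Prop := ∀ (bills : List (List (String × String))) (jurisdiction : String) (policy_area : String), Dom_determine_policy_status bills jurisdiction policy_area → Spec_determine_policy_status bills jurisdiction policy_area (determine_policy_status bills jurisdiction policy_area)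

-- ===== LEMMAS AND PROOFS =====

theorem pvFind?_cons {α : Type} (p : α → Bool) (a : α) (l : List α) :
    (a :: l).find? p = if p a then some a else l.find? p := by
  by_cases h : p a = true <;> simp [List.find?_cons_of_pos, List.find?_cons_of_neg, h]

-- .lower is character-wise, so lowering the concatenation = concatenating the lowered parts
theorem pvLower_append (a b : String) : PySem.Str.lower (a ++ b) = PySem.Str.lower a ++ PySem.Str.lower b := by
  apply String.toList_inj.mp
  simp [PySem.Chars.lower]

-- B's table scan computes A's if-cascade
set_option maxHeartbeats 2000000 in
theorem classify_area_eq (bill : List (String × String)) :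
    classify_area bill = map_bill_to_policy_area bill := by
  unfold classify_area map_bill_to_policy_area
  rw [pvLower_append, pvLower_append, show PySem.Str.lower " " = " " from rfl]
  simp only [pvPolicyTable, pvFind?_cons, List.find?_nil]
  simp only [List.any_cons, List.any_nil, Bool.or_false]
  generalize (PySem.Str.lower ((PySem.Dict.mk bill).getD "title" "") ++ " " ++ PySem.Str.lower ((PySem.Dict.mk bill).getD "keywords_matched" "")) = C
  generalize (PySem.Str.isIn "marriage" C || (PySem.Str.isIn "same-sex marriage" C || PySem.Str.isIn "marriage equality" C)) = c1
  generalize (PySem.Str.isIn "conversion" C || (PySem.Str.isIn "conversion therapy" C || PySem.Str.isIn "conversion practices" C)) = c2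
  generalize (PySem.Str.isIn "gender recognition" C || (PySem.Str.isIn "gender identity" C || (PySem.Str.isIn "birth certificate" C || PySem.Str.isIn "gender marker" C))) = c3
  generalize (PySem.Str.isIn "discrimination" C || (PySem.Str.isIn "anti-discrimination" C || PySem.Str.isIn "equal opportunity" C)) = c4
  generalize (PySem.Str.isIn "incitement" C || PySem.Str.isIn "vilification" C) = w
  generalize (PySem.Str.isIn "hate crime" C) = h
  generalize (PySem.Str.isIn "religious exemption" C || (PySem.Str.isIn "religious freedom" C || PySem.Str.isIn "religious discrimination" C)) = c6
  generalize (PySem.Str.isIn "school" C || (PySem.Str.isIn "education" C || PySem.Str.isIn "student" C)) = c7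
  generalize (PySem.Str.isIn "health" C || (PySem.Str.isIn "healthcare" C || PySem.Str.isIn "medical" C)) = c8
  generalize (PySem.Str.isIn "adoption" C) = c9
  generalize (PySem.Str.isIn "surrogacy" C) = c10
  revert c1 c2 c3 c4 w h c6 c7 c8 c9 c10
  decide

def pvRankOf (s : String) : Int :=
  if PySem.Str.isIn "passed" s then 4
  else if PySem.Str.isIn "rejected" s || PySem.Str.isIn "defeated" s then 3
  else if PySem.Str.isIn "debate" s || PySem.Str.isIn "reading" s || PySem.Str.isIn "committee" s then 2
  else if PySem.Str.isIn "introduced" s then 1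
  else 0

theorem status_rank_eq (st : String) : status_rank st = pvRankOf (PySem.Str.lower st) := by
  unfold status_rank pvRankOf
  simp only [pvStatusRanks, pvFind?_cons, List.find?_nil, List.any_cons, List.any_nil,
    Bool.or_false]
  generalize (PySem.Str.isIn "passed" (PySem.Str.lower st)) = p
  generalize (PySem.Str.isIn "rejected" (PySem.Str.lower st)) = r1
  generalize (PySem.Str.isIn "defeated" (PySem.Str.lower st)) = r2
  generalize (PySem.Str.isIn "debate" (PySem.Str.lower st)) = d1
  generalize (PySem.Str.isIn "reading" (PySem.Str.lower st)) = d2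
  generalize (PySem.Str.isIn "committee" (PySem.Str.lower st)) = d3
  generalize (PySem.Str.isIn "introduced" (PySem.Str.lower st)) = i
  revert p r1 r2 d1 d2 d3 i
  decide

def pvMaxRank (S : List String) : Int :=
  if S.any (fun s => PySem.Str.isIn "passed" s) then 4
  else if S.any (fun s => PySem.Str.isIn "rejected" s || PySem.Str.isIn "defeated" s) then 3
  else if S.any (fun s => PySem.Str.isIn "debate" s || PySem.Str.isIn "reading" s || PySem.Str.isIn "committee" s) then 2
  else if S.any (fun s => PySem.Str.isIn "introduced" s) then 1
  else if S.isEmpty then -1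
  else 0

theorem pvRankOf_nonneg (s : String) : 0 ≤ pvRankOf s := by
  unfold pvRankOf; split_ifs <;> omega

theorem pvMaxRank_core (p r1 r2 d1 d2 d3 i ap ar ad ai e : Bool) :
    (if (p || ap) = true then (4:Int)
     else if (r1 || r2 || ar) = true then 3
     else if (d1 || d2 || d3 || ad) = true then 2
     else if (i || ai) = true then 1
     else if false = true then -1
     else 0) =
    max (if p = true then (4:Int) else if (r1 || r2) = true then 3 else if (d1 || d2 || d3) = true then 2 else if i = true then 1 else 0)
        (if ap = true then 4 else if ar = true then 3 else if ad = true then 2 else if ai = true then 1 else if e = true then -1 else 0) := by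
  revert p r1 r2 d1 d2 d3 i ap ar ad ai e
  decide

theorem pvMaxRank_cons (s : String) (S : List String) :
    pvMaxRank (s :: S) = max (pvRankOf s) (pvMaxRank S) := by
  unfold pvMaxRank pvRankOf
  simp only [List.any_cons, List.isEmpty_cons]
  exact pvMaxRank_core _ _ _ _ _ _ _ _ _ _ _ _

theorem pvFold_bills (L : List (List (String × String))) (a : Int) (ha : -1 ≤ a) :
    L.foldl (fun best b => if pvRankOf (PySem.Str.lower ((PySem.Dict.mk b).getD "status" "")) > best then pvRankOf (PySem.Str.lower ((PySem.Dict.mk b).getD "status" "")) else best) a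
      = max a (pvMaxRank (L.map (fun b => PySem.Str.lower ((PySem.Dict.mk b).getD "status" "")))) := by
  induction L generalizing a with
  | nil => simp [pvMaxRank, max_eq_left ha]
  | cons b L ih =>
    have hr := pvRankOf_nonneg (PySem.Str.lower ((PySem.Dict.mk b).getD "status" ""))
    rw [List.foldl_cons, ih _ (by split_ifs <;> omega)]
    have h2 : (if pvRankOf (PySem.Str.lower ((PySem.Dict.mk b).getD "status" "")) > a then pvRankOf (PySem.Str.lower ((PySem.Dict.mk b).getD "status" "")) else a) = max a (pvRankOf (PySem.Str.lower ((PySem.Dict.mk b).getD "status" ""))) := by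
      split_ifs <;> omega
    rw [h2, List.map_cons, pvMaxRank_cons, ← max_assoc]

theorem pvMaxRank_ge (S : List String) : -1 ≤ pvMaxRank S := by
  unfold pvMaxRank; split_ifs <;> omega

-- ===== VERDICT =====
theorem determine_policy_status_spec : Claim_equal_determine_policy_status := by
  intro bills jurisdiction policy_area _
  unfold Spec_determine_policy_status determine_policy_status determine_policy_status_alt
  simp only [classify_area_eq, status_rank_eq]
  rw [← List.foldl_filter]
  rw [pvFold_bills _ _ (le_refl _)]
  rw [max_eq_right (pvMaxRank_ge _)]
  by_cases hE : (bills.filter (fun b => ((PySem.Dict.mk b).get? "parliament" == some jurisdiction) && (map_bill_to_policy_area b == some policy_area))).isEmpty = true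
  · simp [List.isEmpty_iff.mp hE, pvMaxRank]
  · rw [Bool.not_eq_true] at hE
    have hS : ((bills.filter (fun b => ((PySem.Dict.mk b).get? "parliament" == some jurisdiction) && (map_bill_to_policy_area b == some policy_area))).map (fun b => PySem.Str.lower ((PySem.Dict.mk b).getD "status" ""))).isEmpty = false := by
      simp only [List.isEmpty_map]; exact hE
    simp only [hE, Bool.false_eq_true, if_false]
    unfold pvMaxRank
    rw [hS]
    simp only [Bool.false_eq_true, if_false]
    split_ifs <;> first | decide | omega
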